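-- pv_equiv track=rewrite | github.com/wtain/LeetCodePython | DataStructures/Basic/HashTable/ConvertAnArrayIntoA2DArrayWithConditions.py | custom_check
-- ===== SOURCE A (Python) =====
-- from collections import Counter
--
-- def custom_check(test, result) -> bool:
--     nums = test[0]
--     cnt1 = Counter(nums)
--     cnt2 = Counter()
--     for row in result:
--         cnt2 += Counter(row)
--         if len(set(row)) != len(row):
--             return False
--     return cnt1 == cnt2
-- ===== SOURCE B (Python) =====
-- def custom_check(test, result) -> bool:
--     if any(len(set(row)) != len(row) for row in result):
--         return False
--     flat = sorted(x for row in result for x in row)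
--     return flat == sorted(test[0])
-- ===== Notes on version B (the rewrite author's own statement) =====
-- stated objective: simpler
-- what changed: Replaces the incremental Counter accumulation and hash-map comparison with a whole-list strategy: test all rows for uniqueness with any(), then flatten all rows and compare sorted(flat) with sorted(test[0]).
import Mathlib
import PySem

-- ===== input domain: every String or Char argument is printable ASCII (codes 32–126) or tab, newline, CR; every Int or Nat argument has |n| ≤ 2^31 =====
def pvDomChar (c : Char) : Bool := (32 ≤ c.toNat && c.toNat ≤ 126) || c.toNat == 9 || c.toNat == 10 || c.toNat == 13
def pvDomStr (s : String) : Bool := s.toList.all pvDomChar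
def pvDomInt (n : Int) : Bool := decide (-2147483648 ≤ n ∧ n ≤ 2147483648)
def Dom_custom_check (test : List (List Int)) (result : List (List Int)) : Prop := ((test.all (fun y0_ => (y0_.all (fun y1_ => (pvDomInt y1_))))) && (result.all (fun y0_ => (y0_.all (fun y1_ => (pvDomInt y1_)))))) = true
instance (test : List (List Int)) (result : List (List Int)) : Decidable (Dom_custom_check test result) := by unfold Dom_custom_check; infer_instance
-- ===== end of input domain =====

-- B replaces A's incremental Counter accumulation by an all-rows uniqueness test followed
-- by a sorted-flatten vs sorted-nums comparison (objective: simpler).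

-- ===== PORT A =====
-- Python Counter == is dict equality (order-ignoring); exact here since these counters hold
-- exactly the occurring keys with positive counts: same key set and same count on each key.
def counterEqB (c1 c2 : PySem.Dict Int Int) : Bool :=
  PySem.Set.equal c1.keys c2.keys && c1.keys.all (fun k => c1.getD k 0 == c2.getD k 0)

-- the for-loop of A: cnt2 += Counter(row); early return False on a duplicate row
def customCheckLoop (cnt1 : PySem.Dict Int Int) : PySem.Dict Int Int → List (List Int) → Bool
  | cnt2, [] => counterEqB cnt1 cnt2
  | cnt2, row :: rest =>
    let cnt2' := row.foldl (fun d x => d.modify x 0 (· + 1)) cnt2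
    if (PySem.Set.ofList row).length != row.length then false
    else customCheckLoop cnt1 cnt2' rest

def custom_check (test : List (List Int)) (result : List (List Int)) : Bool :=
  match PySem.List.pyGet? test 0 with
  | none => false   -- IndexError on test[0]; excluded by Pre_custom_check
  | some nums => customCheckLoop (PySem.Dict.counter nums) PySem.Dict.empty result

-- ===== PORT B =====
def custom_check_alt (test : List (List Int)) (result : List (List Int)) : Bool :=
  if result.any (fun row => (PySem.Set.ofList row).length != row.length) then false
  else
    match PySem.List.pyGet? test 0 with
    | none => false   -- IndexError on test[0]; excluded by Pre_custom_check
    | some nums =>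
      PySem.List.sorted (result.flatMap (fun row => row)) (fun x => x) false
        == PySem.List.sorted nums (fun x => x) false

-- ===== PRECONDITION & SPEC =====
-- A reads test[0] unconditionally, so it raises IndexError exactly when test is empty.
def Pre_custom_check (test : List (List Int)) (result : List (List Int)) : Prop := test ≠ []
instance (test : List (List Int)) (result : List (List Int)) : Decidable (Pre_custom_check test result) := by unfold Pre_custom_check; infer_instance
def pvWitness_custom_check : List (List Int) × List (List Int) := ([[1, 2]], [[2, 1]])

def Spec_custom_check (test : List (List Int)) (result : List (List Int)) (out : Bool) : Prop := out = custom_check_alt test result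
instance (test : List (List Int)) (result : List (List Int)) (out : Bool) : Decidable (Spec_custom_check test result out) := by unfold Spec_custom_check; infer_instance

-- ===== CLAIM (what is proved, stated in full; the proofs are below) =====
def Claim_equal_custom_check : Prop := ∀ (test : List (List Int)) (result : List (List Int)), Dom_custom_check test result → Pre_custom_check test result → Spec_custom_check test result (custom_check test result)

-- ===== LEMMAS AND PROOFS =====

-- folding Counter-updates row by row = one fold over the flattened list
theorem foldl_rows_eq_flat (rows : List (List Int)) (d : PySem.Dict Int Int) :
    rows.foldl (fun d row => row.foldl (fun d x => d.modify x 0 (· + 1)) d) d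
      = (rows.flatMap (fun row => row)).foldl (fun d x => d.modify x 0 (· + 1)) d := by
  induction rows generalizing d with
  | nil => rfl
  | cons r rs ih => simp [List.flatMap_cons, List.foldl_append, ih]

-- Counter equality (as A compares it) = equality of all multiplicities
theorem counterEqB_iff (a b : List Int) :
    counterEqB (PySem.Dict.counter a) (PySem.Dict.counter b) = true ↔ ∀ k, a.count k = b.count k := by
  unfold counterEqB
  simp only [Bool.and_eq_true, PySem.Set.equal_iff, PySem.Dict.keys_counter,
    PySem.Set.mem_ofList, List.all_eq_true, PySem.Dict.getD_counter, beq_iff_eq]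
  constructor
  · rintro ⟨hkeys, hcnt⟩ k
    by_cases hk : k ∈ a
    · exact_mod_cast hcnt k (by simpa using hk)
    · have hkb : k ∉ b := fun hb => hk ((hkeys k).2 hb)
      rw [List.count_eq_zero_of_not_mem hk, List.count_eq_zero_of_not_mem hkb]
  · intro h
    refine ⟨fun k => ?_, fun k _ => by exact_mod_cast h k⟩
    simp only [← List.count_pos_iff, h k]
-- ∀ rows, loop = (no dup row) && counterEqB cnt1 (fold all rows into cnt2)
theorem customCheckLoop_eq (cnt1 : PySem.Dict Int Int) (rows : List (List Int)) (cnt2 : PySem.Dict Int Int) :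
    customCheckLoop cnt1 cnt2 rows =
      if rows.any (fun row => (PySem.Set.ofList row).length != row.length) then false
      else counterEqB cnt1
        (rows.foldl (fun d row => row.foldl (fun d x => d.modify x 0 (· + 1)) d) cnt2) := by
  induction rows generalizing cnt2 with
  | nil => rfl
  | cons r rs ih =>
    simp only [customCheckLoop, List.any_cons, List.foldl_cons]
    by_cases h : ((PySem.Set.ofList r).length != r.length) = true
    · simp [h]
    · simp only [Bool.not_eq_true] at h
      simp [h, ih]

-- ===== VERDICT (by name: the statement is the Claim_ definition above) =====
theorem custom_check_spec : Claim_equal_custom_check := by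
  intro test result _ hpre
  unfold Spec_custom_check custom_check custom_check_alt
  obtain ⟨nums, rest, rfl⟩ : ∃ n r, test = n :: r := by
    cases test with
    | nil => exact absurd rfl hpre
    | cons n r => exact ⟨n, r, rfl⟩
  have hget : PySem.List.pyGet? (nums :: rest) (0 : Int) = some nums := by simp [PySem.List.pyGet?, PySem.List.pyIdx?]
  simp only [hget]
  rw [customCheckLoop_eq]
  cases h : result.any (fun row => (PySem.Set.ofList row).length != row.length) with
  | true => simp only [if_true]
  | false =>
    simp only [Bool.false_eq_true, if_false]
    rw [foldl_rows_eq_flat]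
    have hcnt : (result.flatMap (fun row => row)).foldl (fun d x => d.modify x 0 (· + 1)) PySem.Dict.empty
        = PySem.Dict.counter (result.flatMap (fun row => row)) := rfl
    rw [hcnt]
    cases hb : counterEqB (PySem.Dict.counter nums) (PySem.Dict.counter (result.flatMap (fun row => row))) with
    | true =>
      rw [counterEqB_iff] at hb
      have hperm : (result.flatMap (fun row => row)).Perm nums := List.perm_iff_count.2 fun k => (hb k).symm
      exact ((beq_iff_eq).2 ((PySem.List.sorted_id_eq_sorted_id_iff_perm _ _).2 hperm)).symm
    | false =>
      cases hs : (PySem.List.sorted (result.flatMap (fun row => row)) (fun x => x) false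
          == PySem.List.sorted nums (fun x => x) false) with
      | false => rfl
      | true =>
        exfalso
        rw [beq_iff_eq, PySem.List.sorted_id_eq_sorted_id_iff_perm] at hs
        have : counterEqB (PySem.Dict.counter nums) (PySem.Dict.counter (result.flatMap (fun row => row))) = true := by
          rw [counterEqB_iff]; intro k; exact (hs.count_eq k).symm
        rw [this] at hb; cases hb
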